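-- pv_equiv track=rewrite | github.com/seadonggyun4/truthound | src/truthound/checkpoint/analytics/stores/base.py | _matches_labels
-- ===== SOURCE A (Python) =====
-- def _matches_labels(
--
--     point_labels: dict[str, str],
--     filter_labels: dict[str, str],
-- ) -> bool:
--     """Check if point labels match filter.
--
--     Args:
--         point_labels: Labels on the point.
--         filter_labels: Labels to filter by.
--
--     Returns:
--         True if all filter labels match.
--     """
--     for key, value in filter_labels.items():
--         if point_labels.get(key) != value:
--             return False
--     return True
-- ===== SOURCE B (Python) =====
-- def _matches_labels(
--     point_labels: dict[str, str],
--     filter_labels: dict[str, str],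
-- ) -> bool:
--     """Overlay the filter onto the point labels; nothing changes iff every filter label already matched."""
--     return {**point_labels, **filter_labels} == point_labels
-- ===== Notes on version B (the rewrite author's own statement) =====
-- stated objective: alternative
-- what changed: Instead of looking up each filter key and short-circuiting, B overlays filter_labels onto point_labels with a dict merge and returns whether the merged dict equals the original point_labels.
import Mathlib
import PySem

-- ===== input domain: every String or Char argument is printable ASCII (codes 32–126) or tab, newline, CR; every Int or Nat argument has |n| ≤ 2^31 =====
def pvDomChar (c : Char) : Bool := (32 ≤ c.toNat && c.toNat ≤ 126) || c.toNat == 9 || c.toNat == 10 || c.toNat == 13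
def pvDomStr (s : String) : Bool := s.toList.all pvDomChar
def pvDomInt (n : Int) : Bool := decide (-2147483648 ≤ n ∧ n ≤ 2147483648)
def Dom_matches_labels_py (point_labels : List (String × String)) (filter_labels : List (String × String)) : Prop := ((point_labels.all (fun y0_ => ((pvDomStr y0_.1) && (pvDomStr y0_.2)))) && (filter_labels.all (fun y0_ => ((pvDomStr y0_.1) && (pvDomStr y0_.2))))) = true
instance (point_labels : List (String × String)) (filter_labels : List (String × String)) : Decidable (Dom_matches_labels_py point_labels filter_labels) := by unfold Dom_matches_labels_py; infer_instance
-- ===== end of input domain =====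

-- B replaces A's per-key lookup loop with a dict merge ({**point, **filter}) compared against the original point labels (alternative algorithm; similar cost).


-- ===== PORT A =====
-- for key, value in filter_labels.items(): if point_labels.get(key) != value: return False / return True
def pyLoopA (d : PySem.Dict String String) : List (String × String) → Bool
  | [] => true
  | (key, value) :: rest =>
      if (d.get? key == some value) = false then false else pyLoopA d rest

def matches_labels_py (point_labels : List (String × String)) (filter_labels : List (String × String)) : Bool :=
  pyLoopA (PySem.Dict.mk point_labels) filter_labels

-- ===== PORT B =====
-- Python dict == for string dicts (unique keys): same number of entries and every pair of d1 maps identically in d2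
def pyDictEq (d1 d2 : PySem.Dict String String) : Bool :=
  (d1.size == d2.size) && d1.items.all (fun p => d2.get? p.1 == some p.2)

-- {**point_labels, **filter_labels}: insert each filter pair into a copy of point_labels, then compare with ==
def matches_labels_py_alt (point_labels : List (String × String)) (filter_labels : List (String × String)) : Bool :=
  pyDictEq (filter_labels.foldl (fun d p => d.insert p.1 p.2) (PySem.Dict.mk point_labels))
    (PySem.Dict.mk point_labels)

-- ===== PRECONDITION & SPEC =====
-- Pre_ excludes association lists with a duplicate key: such lists do not represent any Python dict
-- (dict keys are unique), so Python A never sees them; on them first-match lookup (A's port) and the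
-- merge (B's port, last write wins) may differ.
def Pre_matches_labels_py (point_labels : List (String × String)) (filter_labels : List (String × String)) : Prop :=
  (point_labels.map Prod.fst).Nodup ∧ (filter_labels.map Prod.fst).Nodup
instance (point_labels : List (String × String)) (filter_labels : List (String × String)) : Decidable (Pre_matches_labels_py point_labels filter_labels) := by unfold Pre_matches_labels_py; infer_instance
def pvWitness_matches_labels_py : (List (String × String)) × (List (String × String)) :=
  ([("app", "web"), ("env", "prod")], [("env", "prod")])
def Spec_matches_labels_py (point_labels : List (String × String)) (filter_labels : List (String × String)) (out : Bool) : Prop := out = matches_labels_py_alt point_labels filter_labels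
instance (point_labels : List (String × String)) (filter_labels : List (String × String)) (out : Bool) : Decidable (Spec_matches_labels_py point_labels filter_labels out) := by unfold Spec_matches_labels_py; infer_instance

-- ===== CLAIM =====
def Claim_equal_matches_labels_py : Prop := ∀ (point_labels : List (String × String)) (filter_labels : List (String × String)), Dom_matches_labels_py point_labels filter_labels → Pre_matches_labels_py point_labels filter_labels → Spec_matches_labels_py point_labels filter_labels (matches_labels_py point_labels filter_labels)

-- ===== LEMMAS AND PROOFS =====

-- A's loop is the 'all' of the per-pair check.
theorem loopA_eq_all (d : PySem.Dict String String) (fl : List (String × String)) :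
    pyLoopA d fl = fl.all (fun p => d.get? p.1 == some p.2) := by
  induction fl with
  | nil => rfl
  | cons p rest ih =>
      obtain ⟨k, v⟩ := p
      by_cases h : d.get? k = some v <;> simp [pyLoopA, h, ih]

-- Lookup in the merged dict: a filter key (filter keys Nodup) wins, otherwise fall through to d.
theorem get?_fold_insert (fl : List (String × String)) (d : PySem.Dict String String)
    (hfl : (fl.map Prod.fst).Nodup) (j : String) :
    (fl.foldl (fun d p => d.insert p.1 p.2) d).get? j =
      ((PySem.Dict.mk fl).get? j).elim (d.get? j) some := by
  induction fl generalizing d with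
  | nil => simp [PySem.Dict.get?]
  | cons p rest ih =>
      obtain ⟨k, v⟩ := p
      simp only [List.map_cons, List.nodup_cons] at hfl
      simp only [List.foldl_cons]
      rw [ih _ hfl.2, PySem.Dict.get?_mk_cons]
      by_cases hjk : k = j
      · subst hjk
        have hnone : (PySem.Dict.mk rest).get? k = none := by
          rw [PySem.Dict.get?_eq_none_iff_not_mem_keys]
          simpa using hfl.1
        simp [hnone, PySem.Dict.get?_insert_self]
      · have hb : (k == j) = false := by simp [hjk]
        simp only [hb]
        cases h : (PySem.Dict.mk rest).get? j with
        | some w => simp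
        | none => simp [PySem.Dict.get?_insert_of_ne _ _ (Ne.symm hjk)]

theorem matches_eq_alt (pl fl : List (String × String))
    (hpl : (pl.map Prod.fst).Nodup) (hfl : (fl.map Prod.fst).Nodup) :
    matches_labels_py pl fl = matches_labels_py_alt pl fl := by
  set D : PySem.Dict String String := PySem.Dict.mk pl with hD
  set M : PySem.Dict String String := fl.foldl (fun d p => d.insert p.1 p.2) D with hM
  have hDkeys : D.keys.Nodup := by simpa [hD, PySem.Dict.keys] using hpl
  have hMkeys : M.keys.Nodup :=
    PySem.Dict.nodup_keys_foldl_insert_key fl Prod.fst (fun _ p => p.2) D hDkeys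
  have hget : ∀ j, M.get? j = ((PySem.Dict.mk fl).get? j).elim (D.get? j) some :=
    fun j => get?_fold_insert fl D hfl j
  have hflitems : (PySem.Dict.mk fl).items = fl := rfl
  have hflkeys : (PySem.Dict.mk fl).keys.Nodup := by simpa [PySem.Dict.keys] using hfl
  rw [matches_labels_py, loopA_eq_all, ← hD]
  by_cases hall : ∀ p ∈ fl, D.get? p.1 = some p.2
  · -- every filter pair already matches: the merge changes nothing, both sides are true
    have hsame : ∀ j, M.get? j = D.get? j := by
      intro j
      rw [hget j]
      cases h : (PySem.Dict.mk fl).get? j with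
      | none => rfl
      | some w =>
          have hmem : (j, w) ∈ fl := by
            have := (PySem.Dict.get?_eq_some_iff_mem_items (PySem.Dict.mk fl) j w hflkeys).mp h
            simpa [hflitems] using this
          simpa using (hall _ hmem).symm
  -- left side
    have hA : fl.all (fun p => D.get? p.1 == some p.2) = true := by
      rw [List.all_eq_true]; intro p hp; simp [hall p hp]
    rw [hA]
    -- right side: sizes equal (same key membership, both Nodup) and every merged pair found in D
    have hperm : M.keys.Perm D.keys := by
      rw [List.perm_ext_iff_of_nodup hMkeys hDkeys]
      intro j
      rw [← PySem.Dict.contains_iff_mem_keys, ← PySem.Dict.contains_iff_mem_keys,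
        PySem.Dict.contains_eq_isSome_get?, PySem.Dict.contains_eq_isSome_get?, hsame j]
    have hsize : M.size = D.size := by
      have := hperm.length_eq
      simpa [PySem.Dict.size, PySem.Dict.keys] using this
    have hitems : ∀ p ∈ M.items, D.get? p.1 = some p.2 := by
      intro p hp
      have := PySem.Dict.get?_of_mem_items M (k := p.1) (v := p.2) hp hMkeys
      rw [← hsame p.1]
      exact this
    symm
    rw [matches_labels_py_alt, pyDictEq]
    simp only [← hD, ← hM]
    rw [hsize]
    simp only [beq_self_eq_true, Bool.true_and, List.all_eq_true]
    intro p hp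
    simp [hitems p hp]
  · -- some filter pair fails: A is false, and that pair survives into the merge, so dict == fails
    push Not at hall
    obtain ⟨p, hp, hne⟩ := hall
    have hA : fl.all (fun p => D.get? p.1 == some p.2) = false := by
      rw [List.all_eq_false]
      exact ⟨p, hp, by simpa using hne⟩
    rw [hA]
    have hfget : (PySem.Dict.mk fl).get? p.1 = some p.2 := by
      apply (PySem.Dict.get?_eq_some_iff_mem_items (PySem.Dict.mk fl) p.1 p.2 hflkeys).mpr
      simpa [hflitems] using hp
    have hMget : M.get? p.1 = some p.2 := by rw [hget, hfget]; rfl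
    have hmemM : (p.1, p.2) ∈ M.items := PySem.Dict.mem_items_of_get?_eq_some M hMget
    symm
    rw [matches_labels_py_alt, pyDictEq]
    simp only [← hD, ← hM]
    apply Bool.and_eq_false_iff.mpr
    right
    rw [List.all_eq_false]
    exact ⟨(p.1, p.2), hmemM, by simpa using hne⟩

-- ===== VERDICT =====
theorem matches_labels_py_spec : Claim_equal_matches_labels_py := by
  intro pl fl _ hpre
  exact matches_eq_alt pl fl hpre.1 hpre.2
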